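-- pv_equiv track=rewrite | github.com/IRLL/HEB_graphs | option_graph/metrics/complexity/utils.py | update_sum_dict
-- ===== SOURCE A (Python) =====
-- from copy import deepcopy
--
-- def update_sum_dict(dict1, dict2):
--     """ Give the sum of two dictionaries. """
--     dict1, dict2 = deepcopy(dict1), deepcopy(dict2)
--     for key, val in dict2.items():
--         try:
--             dict1[key] += val
--         except KeyError:
--             dict1[key] = val
--     return dict1
-- ===== SOURCE B (Python) =====
-- def update_sum_dict(dict1, dict2):
--     """ Give the sum of two dictionaries. """
--     result = {}
--     for key, val in dict1.items():
--         if key in dict2: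
--             result[key] = val + dict2[key]
--         else:
--             result[key] = val
--     for key, val in dict2.items():
--         if key not in dict1:
--             result[key] = val
--     return result
-- ===== Notes on version B (the rewrite author's own statement) =====
-- stated objective: alternative
-- what changed: B builds a fresh result dict by enumerating the union of keys (all of dict1, then dict2-only keys) with a three-way branch, instead of deep-copying dict1 and patching it in place with a try/except over dict2.
import Mathlib
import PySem

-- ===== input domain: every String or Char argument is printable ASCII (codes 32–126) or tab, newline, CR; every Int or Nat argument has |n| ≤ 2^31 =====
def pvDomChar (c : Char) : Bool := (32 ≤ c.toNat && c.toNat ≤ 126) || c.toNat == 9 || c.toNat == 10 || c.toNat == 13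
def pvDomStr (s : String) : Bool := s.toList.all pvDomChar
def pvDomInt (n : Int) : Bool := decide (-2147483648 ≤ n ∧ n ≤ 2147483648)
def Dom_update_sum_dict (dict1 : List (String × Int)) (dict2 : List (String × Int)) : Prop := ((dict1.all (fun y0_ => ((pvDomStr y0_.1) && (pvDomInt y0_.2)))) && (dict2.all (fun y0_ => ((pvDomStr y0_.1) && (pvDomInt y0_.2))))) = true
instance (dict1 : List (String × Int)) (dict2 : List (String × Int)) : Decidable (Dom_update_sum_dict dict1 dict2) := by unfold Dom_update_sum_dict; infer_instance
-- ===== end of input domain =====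

-- B builds a fresh result dict by enumerating the union of keys (dict1's keys, then dict2-only
-- keys) with a three-way branch, instead of copying dict1 and patching it with dict2 over
-- try/except (alternative decomposition, same cost).

-- ===== PORT A =====
-- one pass of A's loop body: try: dict1[key] += val / except KeyError: dict1[key] = val
def pvStepA (d : PySem.Dict String Int) (p : String × Int) : PySem.Dict String Int :=
  match d.get? p.1 with
  | some x => d.insert p.1 (x + p.2)   -- key present: add in place
  | none   => d.insert p.1 p.2         -- KeyError branch: set (appends)

-- deepcopy is semantically the identity here (keys and values are immutable)
def update_sum_dict (dict1 : List (String × Int)) (dict2 : List (String × Int)) : List (String × Int) :=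
  (dict2.foldl pvStepA (PySem.Dict.mk dict1)).items

-- ===== PORT B =====
def update_sum_dict_alt (dict1 : List (String × Int)) (dict2 : List (String × Int)) : List (String × Int) :=
  let d1 := PySem.Dict.mk dict1
  let d2 := PySem.Dict.mk dict2
  let r1 := dict1.foldl (fun r p =>
      match d2.get? p.1 with
      | some w => r.insert p.1 (p.2 + w)   -- key in both: sum
      | none   => r.insert p.1 p.2) PySem.Dict.empty    -- key only in dict1
  let r2 := dict2.foldl (fun r p =>
      if d1.contains p.1 then r else r.insert p.1 p.2) r1    -- key only in dict2
  r2.items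

-- ===== PRECONDITION & SPEC =====
-- Pre_ excludes association lists with duplicate keys: they do not represent any Python dict
-- (a Python dict argument always has distinct keys), so no claim is made about them.
def Pre_update_sum_dict (dict1 : List (String × Int)) (dict2 : List (String × Int)) : Prop :=
  (dict1.map Prod.fst).Nodup ∧ (dict2.map Prod.fst).Nodup
instance (dict1 : List (String × Int)) (dict2 : List (String × Int)) : Decidable (Pre_update_sum_dict dict1 dict2) := by unfold Pre_update_sum_dict; infer_instance

def pvWitness_update_sum_dict : (List (String × Int)) × (List (String × Int)) :=
  ([("a", 1), ("b", 2)], [("b", 10), ("c", 3)])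

def Spec_update_sum_dict (dict1 : List (String × Int)) (dict2 : List (String × Int)) (out : List (String × Int)) : Prop := out = update_sum_dict_alt dict1 dict2
instance (dict1 : List (String × Int)) (dict2 : List (String × Int)) (out : List (String × Int)) : Decidable (Spec_update_sum_dict dict1 dict2 out) := by unfold Spec_update_sum_dict; infer_instance

-- ===== CLAIM (what is proved, stated in full; the proofs are below) =====
def Claim_equal_update_sum_dict : Prop := ∀ (dict1 : List (String × Int)) (dict2 : List (String × Int)), Dom_update_sum_dict dict1 dict2 → Pre_update_sum_dict dict1 dict2 → Spec_update_sum_dict dict1 dict2 (update_sum_dict dict1 dict2)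

-- ===== LEMMAS AND PROOFS =====

-- A's loop characterised: folding pvStepA over a key-distinct list l maps each existing entry
-- of d to "its value + l's value at that key (or 0)" and appends l's fresh entries unchanged.
lemma pvStepA_foldl_items (l : List (String × Int)) (hl : (l.map Prod.fst).Nodup) :
    ∀ (d : PySem.Dict String Int), d.keys.Nodup →
      (l.foldl pvStepA d).items =
        d.items.map (fun p => (p.1, p.2 + (PySem.Dict.mk l).getD p.1 0))
          ++ l.filter (fun r => !(d.contains r.1)) := by
  induction l with
  | nil =>
      intro d _
      simp [PySem.Dict.getD_eq_get?_getD, PySem.Dict.get?]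
  | cons q t ih =>
      obtain ⟨qk, qv⟩ := q
      intro d hd
      have hl' := List.nodup_cons.mp (by simpa using hl : ((qk :: t.map Prod.fst).Nodup))
      have hq1t : qk ∉ t.map Prod.fst := hl'.1
      have ht : (t.map Prod.fst).Nodup := hl'.2
      have hgetnone : (PySem.Dict.mk t).get? qk = none :=
        (PySem.Dict.get?_eq_none_iff_not_mem_keys _ _).mpr (by simpa [PySem.Dict.keys_mk] using hq1t)
      have hfil : ∀ (v : Int), List.filter (fun r => !(d.insert qk v).contains r.1) t
          = List.filter (fun r => !d.contains r.1) t := by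
        intro v
        apply List.filter_congr
        intro r hr
        have hne : r.1 ≠ qk := by
          intro h; exact hq1t (h ▸ List.mem_map_of_mem hr)
        rw [PySem.Dict.contains_insert]
        simp [hne]
      rcases hcq : d.contains qk with _ | _
      · -- key not in d : KeyError branch, entry appended
        have hget : d.get? qk = none := by
          rw [PySem.Dict.get?_eq_none_iff_not_mem_keys]
          intro hmem
          rw [PySem.Dict.contains_eq_decide_mem_keys] at hcq
          simp [hmem] at hcq
        have hstep : pvStepA d (qk, qv) = d.insert qk qv := by simp [pvStepA, hget]
        have hnd' : (d.insert qk qv).keys.Nodup := PySem.Dict.nodup_keys_insert _ _ _ hd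
        have hmap : List.map (fun p => (p.1, p.2 + (PySem.Dict.mk t).getD p.1 0)) d.items
            = List.map (fun p => (p.1, p.2 + (PySem.Dict.mk ((qk, qv) :: t)).getD p.1 0)) d.items := by
          apply List.map_congr_left
          intro p hp
          have hne : qk ≠ p.1 := by
            intro h
            rw [PySem.Dict.contains_eq_decide_mem_keys] at hcq
            exact absurd (h ▸ PySem.Dict.mem_keys_of_mem_items d hp) (by simpa using hcq)
          simp only [PySem.Dict.getD_eq_get?_getD, PySem.Dict.get?_mk_cons]
          simp [hne]
        simp only [List.foldl_cons, hstep, ih ht (d.insert qk qv) hnd',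
          PySem.Dict.items_insert_of_not_contains d qv hcq, List.map_append, hfil]
        rw [← hmap]
        simp [hcq, PySem.Dict.getD_eq_get?_getD, hgetnone]
      · -- key in d : value updated in place
        obtain ⟨x, hx⟩ : ∃ x, d.get? qk = some x := by
          have := PySem.Dict.contains_eq_isSome_get? d qk
          rw [hcq] at this
          exact Option.isSome_iff_exists.mp this.symm
        have hstep : pvStepA d (qk, qv) = d.insert qk (x + qv) := by simp [pvStepA, hx]
        have hnd' : (d.insert qk (x + qv)).keys.Nodup := PySem.Dict.nodup_keys_insert _ _ _ hd
        have hmap : List.map (fun p => (p.1, p.2 + (PySem.Dict.mk t).getD p.1 0))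
              (List.map (fun p => if p.1 == qk then (qk, x + qv) else p) d.items)
            = List.map (fun p => (p.1, p.2 + (PySem.Dict.mk ((qk, qv) :: t)).getD p.1 0)) d.items := by
          rw [List.map_map]
          apply List.map_congr_left
          intro p hp
          by_cases hpe : p.1 = qk
          · have hp2 : d.get? p.1 = some p.2 := by
              rcases p with ⟨pk, pv⟩
              exact PySem.Dict.get?_of_mem_items d hp hd
            rw [hpe] at hp2
            have hxp : p.2 = x := by rw [hp2] at hx; exact (Option.some.injEq _ _).mp hx
            simp only [Function.comp, hpe, beq_self_eq_true, if_true]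
            simp only [PySem.Dict.getD_eq_get?_getD, PySem.Dict.get?_mk_cons]
            simp [hxp, hgetnone]
          · simp only [Function.comp]
            rw [if_neg (by simpa using hpe)]
            simp only [PySem.Dict.getD_eq_get?_getD, PySem.Dict.get?_mk_cons]
            simp [Ne.symm hpe]
        simp only [List.foldl_cons, hstep, ih ht (d.insert qk (x + qv)) hnd',
          PySem.Dict.items_insert_of_contains d (x + qv) hcq, hfil]
        rw [hmap]
        simp [hcq, PySem.Dict.getD_eq_get?_getD]

-- B's second loop: a foldl that skips entries failing a key test is a foldl over the filtered list
lemma pv_foldl_if_skip (c : String → Bool) (l : List (String × Int)) :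
    ∀ (r : PySem.Dict String Int),
      (l.foldl (fun r p => if c p.1 then r else r.insert p.1 p.2) r)
        = ((l.filter (fun p => !(c p.1))).foldl (fun r p => r.insert p.1 p.2) r) := by
  induction l with
  | nil => intro r; rfl
  | cons q t ih =>
      intro r
      by_cases h : c q.1 <;> simp [h, ih]

theorem pv_eq_of_nodup (dict1 dict2 : List (String × Int))
    (h1 : (dict1.map Prod.fst).Nodup) (h2 : (dict2.map Prod.fst).Nodup) :
    update_sum_dict dict1 dict2 = update_sum_dict_alt dict1 dict2 := by
  -- A side
  have hA : update_sum_dict dict1 dict2 =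
      dict1.map (fun p => (p.1, p.2 + (PySem.Dict.mk dict2).getD p.1 0))
        ++ dict2.filter (fun r => !((PySem.Dict.mk dict1).contains r.1)) := by
    unfold update_sum_dict
    exact pvStepA_foldl_items dict2 h2 (PySem.Dict.mk dict1)
      (by simpa [PySem.Dict.keys_mk] using h1)
  -- B side, first loop: all keys fresh, so the entries are appended in dict1's order
  have hfun : (fun (r : PySem.Dict String Int) (p : String × Int) =>
        match (PySem.Dict.mk dict2).get? p.1 with
        | some w => r.insert p.1 (p.2 + w)
        | none   => r.insert p.1 p.2)
      = (fun r p => r.insert p.1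
          (match (PySem.Dict.mk dict2).get? p.1 with
           | some w => p.2 + w
           | none   => p.2)) := by
    funext r p
    cases h : (PySem.Dict.mk dict2).get? p.1 <;> simp
  have hr1 : (dict1.foldl (fun r p =>
        match (PySem.Dict.mk dict2).get? p.1 with
        | some w => r.insert p.1 (p.2 + w)
        | none   => r.insert p.1 p.2) PySem.Dict.empty).items
      = dict1.map (fun p => (p.1,
          match (PySem.Dict.mk dict2).get? p.1 with
          | some w => p.2 + w
          | none   => p.2)) := by
    rw [hfun]
    simpa using PySem.Dict.items_foldl_insert_fresh dict1 Prod.fst _ PySem.Dict.empty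
      (fun a _ => PySem.Dict.contains_empty a.1) h1
  -- keys of the first-loop result are dict1's keys
  have hkeys1 : (dict1.foldl (fun r p =>
        match (PySem.Dict.mk dict2).get? p.1 with
        | some w => r.insert p.1 (p.2 + w)
        | none   => r.insert p.1 p.2) PySem.Dict.empty).keys = dict1.map Prod.fst := by
    simp only [PySem.Dict.keys, hr1, List.map_map]
    rfl
  have hfil2 : ((dict2.filter (fun p => !((PySem.Dict.mk dict1).contains p.1))).map Prod.fst).Nodup :=
    h2.sublist (List.Sublist.map Prod.fst (List.filter_sublist (l := dict2)))
  -- B side, second loop: the dict2-only keys are fresh for the first-loop result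
  have hfresh : ∀ p ∈ dict2.filter (fun p => !((PySem.Dict.mk dict1).contains p.1)),
      (dict1.foldl (fun r p =>
        match (PySem.Dict.mk dict2).get? p.1 with
        | some w => r.insert p.1 (p.2 + w)
        | none   => r.insert p.1 p.2) PySem.Dict.empty).contains p.1 = false := by
    intro p hp
    have hc : ((PySem.Dict.mk dict1).contains p.1) = false := by
      have := List.of_mem_filter hp
      simpa using this
    rw [PySem.Dict.contains_eq_decide_mem_keys, hkeys1]
    rw [PySem.Dict.contains_mk] at hc
    simp only [decide_eq_false_iff_not]
    intro hmem
    obtain ⟨q, hq, hq1⟩ := List.mem_map.mp hmem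
    have : dict1.any (fun r => r.1 == p.1) = true := List.any_eq_true.mpr ⟨q, hq, by simp [hq1]⟩
    rw [hc] at this
    exact absurd this (by simp)
  have hB : update_sum_dict_alt dict1 dict2 =
      dict1.map (fun p => (p.1,
          match (PySem.Dict.mk dict2).get? p.1 with
          | some w => p.2 + w
          | none   => p.2))
        ++ (dict2.filter (fun p => !((PySem.Dict.mk dict1).contains p.1))).map (fun p => (p.1, p.2)) := by
    unfold update_sum_dict_alt
    simp only []
    rw [pv_foldl_if_skip]
    rw [PySem.Dict.items_foldl_insert_fresh _ Prod.fst (fun p => p.2) _ hfresh hfil2, hr1]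
  rw [hA, hB]
  congr 1
  · apply List.map_congr_left
    intro p _
    cases h : (PySem.Dict.mk dict2).get? p.1 <;>
      simp [PySem.Dict.getD_eq_get?_getD, h]
  · simp

-- ===== VERDICT (by name: the statement is the Claim_ definition above) =====
theorem update_sum_dict_spec : Claim_equal_update_sum_dict := by
  intro dict1 dict2 _ hpre
  show update_sum_dict dict1 dict2 = update_sum_dict_alt dict1 dict2
  exact pv_eq_of_nodup dict1 dict2 hpre.1 hpre.2
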